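-- pv_equiv track=rewrite | github.com/quac1605/5_nodes_topology | 5NodesTopology/range_query_2708.py | index_in_intervals
-- ===== SOURCE A (Python) =====
-- from typing import Dict, List, Tuple
--
-- def index_in_intervals(idx: int, intervals: List[Tuple[int, int]]) -> bool:
--     """Binary search over non-overlapping, sorted intervals."""
--     lo, hi = 0, len(intervals) - 1
--     while lo <= hi:
--         mid = (lo + hi) // 2
--         a, b = intervals[mid]
--         if idx < a: hi = mid - 1
--         elif idx > b: lo = mid + 1
--         else: return True
--     return False
-- ===== SOURCE B (Python) =====
-- from typing import Dict, List, Tuple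
--
-- def index_in_intervals(idx: int, intervals: List[Tuple[int, int]]) -> bool:
--     """Binary search by slicing: shrink the candidate window list itself."""
--     window = intervals
--     while window:
--         mid = (len(window) - 1) // 2
--         a, b = window[mid]
--         if idx < a:
--             window = window[:mid]
--         elif idx > b:
--             window = window[mid + 1:]
--         else:
--             return True
--     return False
-- ===== Notes on version B (the rewrite author's own statement) =====
-- stated objective: alternative
-- what changed: Replaced A's lo/hi index bookkeeping with a binary search that shrinks the candidate window list itself by slicing (window[:mid] / window[mid+1:]) with midpoint (len(window)-1)//2, which equals A's in-window midpoint, so the two agree on every input, sorted or not.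
import Mathlib
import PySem

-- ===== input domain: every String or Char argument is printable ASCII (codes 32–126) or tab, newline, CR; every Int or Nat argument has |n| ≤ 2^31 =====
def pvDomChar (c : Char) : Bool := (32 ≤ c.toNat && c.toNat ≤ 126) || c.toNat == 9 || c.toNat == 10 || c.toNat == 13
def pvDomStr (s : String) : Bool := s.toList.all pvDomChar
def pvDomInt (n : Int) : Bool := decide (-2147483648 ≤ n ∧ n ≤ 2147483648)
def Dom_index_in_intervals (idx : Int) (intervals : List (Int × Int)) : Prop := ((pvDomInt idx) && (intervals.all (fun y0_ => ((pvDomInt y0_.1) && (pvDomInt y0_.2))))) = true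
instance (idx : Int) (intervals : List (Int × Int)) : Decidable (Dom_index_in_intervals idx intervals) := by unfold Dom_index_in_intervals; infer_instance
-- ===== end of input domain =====

-- B replaces A's lo/hi index bookkeeping by a binary search that shrinks the candidate
-- window LIST itself via slicing, with midpoint (len(window)-1)//2; same values everywhere.


-- ===== PORT A =====
-- A's while-loop: state (lo, hi), iterated while lo <= hi; mid = (lo + hi) // 2
def pvLoopA (idx : Int) (intervals : List (Int × Int)) (lo hi : Int) : Bool :=
  if h : lo ≤ hi then
    match PySem.List.pyGet? intervals (PySem.Int.floordiv (lo + hi) 2) with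
    | none => false   -- IndexError is unreachable from the initial call (0 ≤ lo ≤ mid ≤ hi < len)
    | some (a, b) =>
      if idx < a then pvLoopA idx intervals lo (PySem.Int.floordiv (lo + hi) 2 - 1)
      else if idx > b then pvLoopA idx intervals (PySem.Int.floordiv (lo + hi) 2 + 1) hi
      else true
  else false
termination_by (hi + 1 - lo).toNat
decreasing_by
  · have := PySem.Int.floordiv_two_mid_bounds h; omega
  · have := PySem.Int.floordiv_two_mid_bounds h; omega

def index_in_intervals (idx : Int) (intervals : List (Int × Int)) : Bool :=
  pvLoopA idx intervals 0 ((intervals.length : Int) - 1)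

-- ===== PORT B =====
-- index bound used by B's window[mid] (in range whenever the window is nonempty)
theorem pvWinB_mid_lt {α : Type} {window : List α} (hne : ¬ window.isEmpty = true) :
    (window.length - 1) / 2 < window.length := by
  have h0 : window.length ≠ 0 := by
    simpa [List.isEmpty_iff_length_eq_zero] using hne
  have := Nat.div_le_self (window.length - 1) 2
  omega

-- B's while-loop over the shrinking window list. mid = (len(window)-1)//2 on a nonempty
-- window is the Nat division (window.length - 1) / 2; window[mid] cannot raise (mid < len,
-- pvWinB_mid_lt); window[:mid] / window[mid+1:] with these nonnegative bounds are exactly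
-- take mid / drop (mid + 1) (PySem.List.slice_to_natCast / slice_from_natCast).
def pvWinB (idx : Int) (window : List (Int × Int)) : Bool :=
  if hne : window.isEmpty then false
  else
    if idx < (window[(window.length - 1) / 2]'(pvWinB_mid_lt hne)).1 then
      pvWinB idx (window.take ((window.length - 1) / 2))
    else if idx > (window[(window.length - 1) / 2]'(pvWinB_mid_lt hne)).2 then
      pvWinB idx (window.drop ((window.length - 1) / 2 + 1))
    else true
termination_by window.length
decreasing_by
  · have := pvWinB_mid_lt hne
    simp only [List.length_take]
    omega
  · have h0 : window.length ≠ 0 := by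
      simpa [List.isEmpty_iff_length_eq_zero] using hne
    simp only [List.length_drop]
    omega

def index_in_intervals_alt (idx : Int) (intervals : List (Int × Int)) : Bool :=
  pvWinB idx intervals

-- ===== PRECONDITION & SPEC =====
def Spec_index_in_intervals (idx : Int) (intervals : List (Int × Int)) (out : Bool) : Prop := out = index_in_intervals_alt idx intervals
instance (idx : Int) (intervals : List (Int × Int)) (out : Bool) : Decidable (Spec_index_in_intervals idx intervals out) := by unfold Spec_index_in_intervals; infer_instance

-- ===== CLAIM =====
def Claim_equal_index_in_intervals : Prop := ∀ (idx : Int) (intervals : List (Int × Int)), Dom_index_in_intervals idx intervals → Spec_index_in_intervals idx intervals (index_in_intervals idx intervals)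

-- ===== LEMMAS AND PROOFS =====

-- A's loop on the index window [lo, hi] computes B's loop on the corresponding sublist.
theorem pvLoopA_eq_pvWinB (idx : Int) (intervals : List (Int × Int)) (lo hi : Int)
    (hlo : 0 ≤ lo) (hhi : hi < (intervals.length : Int)) :
    pvLoopA idx intervals lo hi =
      pvWinB idx ((intervals.drop lo.toNat).take (hi + 1 - lo).toNat) := by
  rw [pvLoopA, pvWinB]
  by_cases h : lo ≤ hi
  · have hwlen : ((intervals.drop lo.toNat).take (hi + 1 - lo).toNat).length
        = (hi + 1 - lo).toNat := by
      simp only [List.length_take, List.length_drop]; omega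
    have hwne : ¬ ((intervals.drop lo.toNat).take (hi + 1 - lo).toNat).isEmpty = true := by
      simp only [List.isEmpty_iff_length_eq_zero, hwlen]; omega
    rw [dif_pos h, dif_neg hwne]
    have hbd := PySem.Int.floordiv_two_mid_bounds h
    have hfd : PySem.Int.floordiv (lo + hi) 2 = (lo + hi) / 2 :=
      PySem.Int.floordiv_eq_ediv_of_pos (by omega)
    set midA := PySem.Int.floordiv (lo + hi) 2 with hmidA
    have hmid_eq : midA.toNat = lo.toNat + ((hi + 1 - lo).toNat - 1) / 2 := by
      rw [hfd] at hmidA; omega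
    have hget : PySem.List.pyGet? intervals midA
        = some (intervals[midA.toNat]'(by rw [hfd] at hmidA; omega)) :=
      PySem.List.pyGet?_eq_some_getElem intervals (by omega) (by omega)
    simp only [hget, List.get_eq_getElem, List.getElem_take, List.getElem_drop, hwlen, ← hmid_eq]
    by_cases h1 : idx < (intervals[midA.toNat]'(by rw [hfd] at hmidA; omega)).1
    · rw [if_pos h1, if_pos h1]
      rw [pvLoopA_eq_pvWinB idx intervals lo (midA - 1) hlo (by omega)]
      congr 1
      rw [List.take_take]
      congr 1
      rw [hfd] at hmidA
      omega
    · rw [if_neg h1, if_neg h1]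
      by_cases h2 : idx > (intervals[midA.toNat]'(by rw [hfd] at hmidA; omega)).2
      · rw [if_pos h2, if_pos h2]
        rw [pvLoopA_eq_pvWinB idx intervals (midA + 1) hi (by omega) hhi]
        have hw2 : List.drop (((hi + 1 - lo).toNat - 1) / 2 + 1)
              (List.take (hi + 1 - lo).toNat (List.drop lo.toNat intervals))
            = List.take (hi + 1 - (midA + 1)).toNat (List.drop (midA + 1).toNat intervals) := by
          rw [List.drop_take, List.drop_drop]
          rw [hfd] at hmidA
          congr 1
          · omega
          · congr 1
            omega
        rw [hw2]
      · rw [if_neg h2, if_neg h2]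
  · have hz : (hi + 1 - lo).toNat = 0 := by omega
    rw [dif_neg h, hz, List.take_zero, dif_pos (by simp)]
termination_by (hi + 1 - lo).toNat
decreasing_by
  · have := PySem.Int.floordiv_two_mid_bounds h; omega
  · have := PySem.Int.floordiv_two_mid_bounds h; omega

-- ===== VERDICT =====
theorem index_in_intervals_spec : Claim_equal_index_in_intervals := by
  intro idx intervals _
  unfold Spec_index_in_intervals index_in_intervals index_in_intervals_alt
  rw [pvLoopA_eq_pvWinB idx intervals 0 ((intervals.length : Int) - 1) le_rfl (by omega)]
  congr 1
  simp
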